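-- pv_equiv track=rewrite | github.com/nixternal/CodingChallenges | EverybodyCodes/2025-The_Song_of_Ducks_and_Dragons/10.py | part_two
-- ===== SOURCE A (Python) =====
-- MOVES = ((2, 1), (2, -1), (-2, 1), (-2, -1), (1, 2), (1, -2), (-1, 2), (-1, -2))
--
-- def get_reachable(positions, rows, cols):
--     """Return all squares reachable in one knight move."""
--     reachable = set()
--     for r, c in positions:
--         for dr, dc in MOVES:
--             nr, nc = r + dr, c + dc
--             if 0 <= nr < rows and 0 <= nc < cols:
--                 reachable.add((nr, nc))
--     return reachable
--
-- def part_two(data: list) -> int: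
--     """Simulate 20 rounds of dragon chasing sheep."""
--     board = data[1].splitlines()
--     rows, cols = len(board), len(board[0])
--
--     # Parse board
--     dragon = set()
--     sheep = set()
--     hideouts = set()
--
--     for r in range(rows):
--         for c in range(cols):
--             ch = board[r][c]
--             if ch == "D":
--                 dragon.add((r, c))
--             elif ch == "S":
--                 sheep.add((r, c))
--             elif ch == "#":
--                 hideouts.add((r, c))
--
--     eaten = 0
--
--     for _ in range(20):
--         # Dragon moves and eats exposed sheep
--         dragon = get_reachable(dragon, rows, cols)
--         vulnerable = dragon & sheep - hideouts
--         eaten += len(vulnerable)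
--         sheep -= vulnerable
--
--         # Sheep move down; eaten if they land on dragon (not in hideout)
--         next_sheep = set()
--         for r, c in sheep:
--             if r < rows - 1:  # Not at bottom
--                 nr = r + 1
--                 if (nr, c) not in dragon or (nr, c) in hideouts:
--                     next_sheep.add((nr, c))
--                 else:
--                     eaten += 1
--             # Sheep at bottom row escape (don't add to next_sheep)
--
--         sheep = next_sheep
--
--     return eaten
-- ===== SOURCE B (Python) =====
-- def part_two(data: list) -> int:
--     """Simulate 20 rounds on boolean grids (double-buffered) instead of coordinate sets."""
--     board = data[1].splitlines()
--     rows, cols = len(board), len(board[0])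
--     dragon = [[board[r][c] == "D" for c in range(cols)] for r in range(rows)]
--     sheep = [[board[r][c] == "S" for c in range(cols)] for r in range(rows)]
--     hide = [[board[r][c] == "#" for c in range(cols)] for r in range(rows)]
--     offs = ((2, 1), (2, -1), (-2, 1), (-2, -1), (1, 2), (1, -2), (-1, 2), (-1, -2))
--     eaten = 0
--     for _ in range(20):
--         # pull-expansion: a cell holds a dragon iff a knight source cell held one
--         dragon = [[any(0 <= r - dr < rows and 0 <= c - dc < cols and dragon[r - dr][c - dc]
--                        for dr, dc in offs)
--                    for c in range(cols)] for r in range(rows)]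
--         danger = [[dragon[r][c] and not hide[r][c] for c in range(cols)] for r in range(rows)]
--         surv = [[sheep[r][c] and not danger[r][c] for c in range(cols)] for r in range(rows)]
--         eaten += sum(1 for r in range(rows) for c in range(cols)
--                      if sheep[r][c] and danger[r][c])
--         eaten += sum(1 for r in range(rows - 1) for c in range(cols)
--                      if surv[r][c] and danger[r + 1][c])
--         sheep = [[r > 0 and surv[r - 1][c] and not danger[r][c] for c in range(cols)]
--                  for r in range(rows)]
--     return eaten
-- ===== Notes on version B (the rewrite author's own statement) =====
-- stated objective: alternative
-- what changed: B replaces A's coordinate-set simulation (push-expansion of a dragon set, set intersection/difference and a set-iteration move loop) by a double-buffered 2D boolean-grid simulation: each round it rebuilds the dragon grid by pulling from the 8 knight-source offsets of every cell and counts/moves sheep by scanning all cells.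
import Mathlib
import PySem

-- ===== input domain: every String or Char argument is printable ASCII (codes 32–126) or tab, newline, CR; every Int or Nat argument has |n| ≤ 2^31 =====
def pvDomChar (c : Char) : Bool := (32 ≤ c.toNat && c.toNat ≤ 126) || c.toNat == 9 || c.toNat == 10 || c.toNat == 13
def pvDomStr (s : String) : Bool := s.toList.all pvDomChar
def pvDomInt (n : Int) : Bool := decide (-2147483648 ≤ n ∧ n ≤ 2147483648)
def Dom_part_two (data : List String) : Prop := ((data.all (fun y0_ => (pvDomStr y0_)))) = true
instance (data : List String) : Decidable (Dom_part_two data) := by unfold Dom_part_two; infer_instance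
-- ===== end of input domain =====

-- B re-implements the 20-round simulation on boolean grids (double-buffered pull-expansion and
-- per-cell scans) instead of A's coordinate sets; objective: alternative data structure, same result.

-- ===== PORT A =====
def pvMoves : List (Int × Int) :=
  [(2, 1), (2, -1), (-2, 1), (-2, -1), (1, 2), (1, -2), (-1, 2), (-1, -2)]

def pvGetReachable (positions : PySem.Set (Int × Int)) (rows cols : Int) :
    PySem.Set (Int × Int) :=
  positions.foldl (fun reach p =>
    pvMoves.foldl (fun reach m =>
      if 0 ≤ p.1 + m.1 ∧ p.1 + m.1 < rows ∧ 0 ≤ p.2 + m.2 ∧ p.2 + m.2 < cols then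
        PySem.Set.add reach (p.1 + m.1, p.2 + m.2)
      else reach) reach) PySem.Set.empty

def part_two (data : List String) : Int :=
  let board := PySem.Str.splitlines (PySem.List.pyGetD data 1 "")
  let rows : Int := board.length
  let cols : Int := PySem.Str.len (PySem.List.pyGetD board 0 "")
  let parsed := (PySem.List.pyRange 0 rows 1).foldl (fun st r =>
      (PySem.List.pyRange 0 cols 1).foldl (fun (st : PySem.Set (Int × Int) × PySem.Set (Int × Int) × PySem.Set (Int × Int)) c =>
        let ch := PySem.List.pyGetD (PySem.List.pyGetD board r "").toList c ' '
        if ch = 'D' then (PySem.Set.add st.1 (r, c), st.2.1, st.2.2)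
        else if ch = 'S' then (st.1, PySem.Set.add st.2.1 (r, c), st.2.2)
        else if ch = '#' then (st.1, st.2.1, PySem.Set.add st.2.2 (r, c))
        else st) st)
    ((PySem.Set.empty, PySem.Set.empty, PySem.Set.empty))
  let hideouts := parsed.2.2
  let fin := (PySem.List.pyRange 0 20 1).foldl
    (fun (st : PySem.Set (Int × Int) × PySem.Set (Int × Int) × Int) _ =>
      let dragon := pvGetReachable st.1 rows cols
      let vulnerable := PySem.Set.diff (PySem.Set.inter dragon st.2.1) hideouts
      let eaten := st.2.2 + PySem.Set.len vulnerable
      let sheep := PySem.Set.diff st.2.1 vulnerable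
      let moved := sheep.foldl (fun (acc : PySem.Set (Int × Int) × Int) p =>
          if p.1 < rows - 1 then
            if !PySem.Set.contains dragon (p.1 + 1, p.2) ||
               PySem.Set.contains hideouts (p.1 + 1, p.2) then
              (PySem.Set.add acc.1 (p.1 + 1, p.2), acc.2)
            else (acc.1, acc.2 + 1)
          else acc) (PySem.Set.empty, eaten)
      (dragon, moved.1, moved.2)) (parsed.1, parsed.2.1, 0)
  fin.2.2

-- ===== PORT B =====
def pvOffs : List (Int × Int) :=
  [(2, 1), (2, -1), (-2, 1), (-2, -1), (1, 2), (1, -2), (-1, 2), (-1, -2)]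

-- cell lookup in a boolean grid (guards in the code keep every index in range)
def pvAt (g : List (List Bool)) (r c : Nat) : Bool := (g.getD r []).getD c false

-- [[f r c for c in range(cols)] for r in range(rows)]
def pvMkGrid (rows cols : Nat) (f : Nat → Nat → Bool) : List (List Bool) :=
  (List.range rows).map (fun r => (List.range cols).map (fun c => f r c))

def part_two_alt (data : List String) : Int :=
  let board := PySem.Str.splitlines (PySem.List.pyGetD data 1 "")
  let rows := board.length
  let cols := (PySem.List.pyGetD board 0 "").toList.length
  let cAt : Nat → Nat → Char := fun r c => (board.getD r "").toList.getD c ' '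
  let dragon0 := pvMkGrid rows cols (fun r c => cAt r c == 'D')
  let sheep0 := pvMkGrid rows cols (fun r c => cAt r c == 'S')
  let hide := pvMkGrid rows cols (fun r c => cAt r c == '#')
  let fin := (PySem.List.pyRange 0 20 1).foldl
    (fun (st : List (List Bool) × List (List Bool) × Int) _ =>
      let dragon := pvMkGrid rows cols (fun r c =>
        pvOffs.any (fun m =>
          decide (0 ≤ (r : Int) - m.1 ∧ (r : Int) - m.1 < (rows : Int) ∧
                  0 ≤ (c : Int) - m.2 ∧ (c : Int) - m.2 < (cols : Int)) &&
          pvAt st.1 ((r : Int) - m.1).toNat ((c : Int) - m.2).toNat))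
      let danger := pvMkGrid rows cols (fun r c => pvAt dragon r c && !pvAt hide r c)
      let surv := pvMkGrid rows cols (fun r c => pvAt st.2.1 r c && !pvAt danger r c)
      let e1 := (List.range rows).foldl (fun acc r => (List.range cols).foldl (fun acc c =>
          if pvAt st.2.1 r c && pvAt danger r c then acc + 1 else acc) acc) st.2.2
      let e2 := (List.range (rows - 1)).foldl (fun acc r => (List.range cols).foldl (fun acc c =>
          if pvAt surv r c && pvAt danger (r + 1) c then acc + 1 else acc) acc) e1
      let sheep := pvMkGrid rows cols (fun r c =>
        decide (0 < r) && pvAt surv (r - 1) c && !pvAt danger r c)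
      (dragon, sheep, e2)) (dragon0, sheep0, 0)
  fin.2.2

-- ===== PRECONDITION & SPEC =====
-- Pre_ excludes exactly the inputs where A raises: fewer than two strings (IndexError on data[1]),
-- an empty line list (IndexError on board[0]), or a line shorter than the first (IndexError on board[r][c]).
def Pre_part_two (data : List String) : Prop :=
  2 ≤ data.length ∧
  PySem.Str.splitlines (data.getD 1 "") ≠ [] ∧
  ∀ line ∈ PySem.Str.splitlines (data.getD 1 ""),
    ((PySem.Str.splitlines (data.getD 1 "")).getD 0 "").toList.length ≤ line.toList.length
instance (data : List String) : Decidable (Pre_part_two data) := by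
  unfold Pre_part_two; infer_instance

def pvWitness_part_two : List String := ["", "D.\nS#"]

def Spec_part_two (data : List String) (out : Int) : Prop := out = part_two_alt data
instance (data : List String) (out : Int) : Decidable (Spec_part_two data out) := by
  unfold Spec_part_two; infer_instance

-- ===== CLAIM (what is proved, stated in full; the proofs are below) =====
def Claim_equal_part_two : Prop :=
  ∀ (data : List String), Dom_part_two data → Pre_part_two data →
    Spec_part_two data (part_two data)

-- ===== LEMMAS AND PROOFS =====

-- in-range predicate for a coordinate pair
def pvInR (rows cols : Nat) (p : Int × Int) : Prop :=
  0 ≤ p.1 ∧ p.1 < (rows : Int) ∧ 0 ≤ p.2 ∧ p.2 < (cols : Int)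

-- a coordinate set and a boolean grid describe the same in-range cells
def pvGoodS (rows cols : Nat) (S : PySem.Set (Int × Int)) (g : List (List Bool)) : Prop :=
  S.Nodup ∧ (∀ p ∈ S, pvInR rows cols p) ∧
  ∀ r c : Nat, r < rows → c < cols → (((r : Int), (c : Int)) ∈ S ↔ pvAt g r c = true)

theorem pvAt_mk (rows cols : Nat) (f : Nat → Nat → Bool) {r c : Nat}
    (hr : r < rows) (hc : c < cols) : pvAt (pvMkGrid rows cols f) r c = f r c := by
  simp [pvAt, pvMkGrid, List.getD, List.getElem?_map, List.getElem?_range, hr, hc]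

theorem pv_mem_foldl_add_if {β : Type} (l : List β) (P : β → Prop) [DecidablePred P]
    (f : β → Int × Int) (s : PySem.Set (Int × Int)) (x : Int × Int) :
    x ∈ l.foldl (fun s b => if P b then PySem.Set.add s (f b) else s) s ↔
      x ∈ s ∨ ∃ b ∈ l, P b ∧ x = f b := by
  induction l generalizing s with
  | nil => simp
  | cons a l ih =>
    simp only [List.foldl_cons, ih]
    by_cases h : P a <;> simp [h, PySem.Set.mem_add] <;> tauto

theorem pv_nodup_foldl_add_if {β : Type} (l : List β) (P : β → Prop) [DecidablePred P]
    (f : β → Int × Int) (s : PySem.Set (Int × Int)) (hs : s.Nodup) :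
    (l.foldl (fun s b => if P b then PySem.Set.add s (f b) else s) s).Nodup := by
  induction l generalizing s with
  | nil => exact hs
  | cons a l ih =>
    simp only [List.foldl_cons]
    by_cases h : P a <;> simp [h]
    · exact ih _ (PySem.Set.nodup_add _ _ hs)
    · exact ih _ hs

theorem pv_mem_getReachable (S : PySem.Set (Int × Int)) (rows cols : Int) (x : Int × Int) :
    x ∈ pvGetReachable S rows cols ↔
      ∃ p ∈ S, ∃ m ∈ pvMoves,
        (0 ≤ p.1 + m.1 ∧ p.1 + m.1 < rows ∧ 0 ≤ p.2 + m.2 ∧ p.2 + m.2 < cols) ∧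
        x = (p.1 + m.1, p.2 + m.2) := by
  have aux : ∀ (l : List (Int × Int)) (acc : PySem.Set (Int × Int)),
      x ∈ l.foldl (fun reach p =>
        pvMoves.foldl (fun reach m =>
          if 0 ≤ p.1 + m.1 ∧ p.1 + m.1 < rows ∧ 0 ≤ p.2 + m.2 ∧ p.2 + m.2 < cols then
            PySem.Set.add reach (p.1 + m.1, p.2 + m.2)
          else reach) reach) acc ↔
        x ∈ acc ∨ ∃ p ∈ l, ∃ m ∈ pvMoves,
          (0 ≤ p.1 + m.1 ∧ p.1 + m.1 < rows ∧ 0 ≤ p.2 + m.2 ∧ p.2 + m.2 < cols) ∧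
          x = (p.1 + m.1, p.2 + m.2) := by
    intro l
    induction l with
    | nil => simp
    | cons a l ih =>
      intro acc
      simp only [List.foldl_cons, ih,
        pv_mem_foldl_add_if pvMoves _ (fun m => (a.1 + m.1, a.2 + m.2)) acc x,
        List.mem_cons]
      constructor
      · rintro ((h | ⟨m, hm, hc, hx⟩) | ⟨p, hp, m, hm, hc, hx⟩)
        · exact Or.inl h
        · exact Or.inr ⟨a, Or.inl rfl, m, hm, hc, hx⟩
        · exact Or.inr ⟨p, Or.inr hp, m, hm, hc, hx⟩
      · rintro (h | ⟨p, (rfl | hp), m, hm, hc, hx⟩)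
        · exact Or.inl (Or.inl h)
        · exact Or.inl (Or.inr ⟨m, hm, hc, hx⟩)
        · exact Or.inr ⟨p, hp, m, hm, hc, hx⟩
  simpa using aux S PySem.Set.empty

theorem pv_nodup_getReachable (S : PySem.Set (Int × Int)) (rows cols : Int) :
    (pvGetReachable S rows cols).Nodup := by
  have aux : ∀ (l : List (Int × Int)) (acc : PySem.Set (Int × Int)), acc.Nodup →
      (l.foldl (fun reach p =>
        pvMoves.foldl (fun reach m =>
          if 0 ≤ p.1 + m.1 ∧ p.1 + m.1 < rows ∧ 0 ≤ p.2 + m.2 ∧ p.2 + m.2 < cols then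
            PySem.Set.add reach (p.1 + m.1, p.2 + m.2)
          else reach) reach) acc).Nodup := by
    intro l
    induction l with
    | nil => exact fun acc h => h
    | cons a l ih =>
      intro acc hacc
      exact ih _ (pv_nodup_foldl_add_if pvMoves _ (fun m => (a.1 + m.1, a.2 + m.2)) acc hacc)
  exact aux S PySem.Set.empty List.nodup_nil

theorem pv_count_fold (rows cols : Nat) (C : Nat → Nat → Bool) (e0 : Int) :
    (List.range rows).foldl (fun acc r => (List.range cols).foldl (fun acc c =>
        if C r c then acc + 1 else acc) acc) e0
      = e0 + (((List.range rows ×ˢ List.range cols)).filter (fun p => C p.1 p.2)).length := by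
  have h1 : (List.range rows ×ˢ List.range cols)
      = (List.range rows).flatMap (fun r => (List.range cols).map (Prod.mk r)) := rfl
  have h2 := List.foldl_flatMap
    (f := fun r => (List.range cols).map (Prod.mk r))
    (g := fun (acc : Int) (p : Nat × Nat) => if C p.1 p.2 then acc + 1 else acc)
    (l := List.range rows) (init := e0)
  simp only [List.foldl_map] at h2
  rw [h1, ← List.countP_eq_length_filter,
    ← PySem.List.foldl_count_if (fun p : Nat × Nat => C p.1 p.2), h2]

theorem pv_length_eq_grid (rows cols : Nat) (L : List (Int × Int)) (hnd : L.Nodup)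
    (C : Nat → Nat → Bool)
    (hmem : ∀ x, x ∈ L ↔ ∃ r < rows, ∃ c < cols, C r c = true ∧ x = ((r : Int), (c : Int))) :
    (L.length : Int) = (((List.range rows ×ˢ List.range cols)).filter (fun p => C p.1 p.2)).length := by
  have hMnd : ((List.range rows ×ˢ List.range cols).filter (fun p => C p.1 p.2)).Nodup :=
    List.Nodup.filter _ (List.Nodup.product (List.nodup_range) (List.nodup_range))
  have hinj : Function.Injective (fun p : Nat × Nat => (((p.1 : Int), (p.2 : Int)) : Int × Int)) := by
    intro a b h
    simp only [Prod.mk.injEq, Nat.cast_inj] at h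
    exact Prod.ext h.1 h.2
  have hM'nd : (((List.range rows ×ˢ List.range cols).filter
      (fun p => C p.1 p.2)).map (fun p => (((p.1 : Int), (p.2 : Int)) : Int × Int))).Nodup :=
    List.Nodup.map hinj hMnd
  have hperm : L.Perm (((List.range rows ×ˢ List.range cols).filter
      (fun p => C p.1 p.2)).map (fun p => (((p.1 : Int), (p.2 : Int)) : Int × Int))) := by
    rw [List.perm_ext_iff_of_nodup hnd hM'nd]
    intro x
    rw [hmem]
    simp only [List.mem_map, List.mem_filter, Prod.exists, List.mem_product, List.mem_range]
    constructor
    · rintro ⟨r, hr, c, hc, hC, rfl⟩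
      exact ⟨r, c, ⟨⟨hr, hc⟩, hC⟩, rfl⟩
    · rintro ⟨r, c, ⟨⟨hr, hc⟩, hC⟩, rfl⟩
      exact ⟨r, hr, c, hc, hC, rfl⟩
  rw [hperm.length_eq, List.length_map]

-- folding the same ignored list preserves a step-preserved relation
theorem pv_fold_rel {σ₁ σ₂ γ : Type} (R : σ₁ → σ₂ → Prop) (fA : σ₁ → σ₁) (fB : σ₂ → σ₂)
    (h : ∀ a b, R a b → R (fA a) (fB b)) (l : List γ) (a : σ₁) (b : σ₂) (hab : R a b) :
    R (l.foldl (fun s _ => fA s) a) (l.foldl (fun s _ => fB s) b) := by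
  induction l generalizing a b with
  | nil => exact hab
  | cons x l ih => exact ih _ _ (h _ _ hab)

-- ----- proof-side named forms of the two round bodies and of A's parse -----

def pvCAt (board : List String) (r c : Nat) : Char := (board.getD r "").toList.getD c ' '

def pvParseA (board : List String) :
    PySem.Set (Int × Int) × PySem.Set (Int × Int) × PySem.Set (Int × Int) :=
  (PySem.List.pyRange 0 (board.length : Int) 1).foldl (fun st r =>
      (PySem.List.pyRange 0 (PySem.Str.len (PySem.List.pyGetD board 0 "")) 1).foldl
        (fun (st : PySem.Set (Int × Int) × PySem.Set (Int × Int) × PySem.Set (Int × Int)) c =>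
        if PySem.List.pyGetD (PySem.List.pyGetD board r "").toList c ' ' = 'D' then
          (PySem.Set.add st.1 (r, c), st.2.1, st.2.2)
        else if PySem.List.pyGetD (PySem.List.pyGetD board r "").toList c ' ' = 'S' then
          (st.1, PySem.Set.add st.2.1 (r, c), st.2.2)
        else if PySem.List.pyGetD (PySem.List.pyGetD board r "").toList c ' ' = '#' then
          (st.1, st.2.1, PySem.Set.add st.2.2 (r, c))
        else st) st)
    ((PySem.Set.empty, PySem.Set.empty, PySem.Set.empty))

def pvStepA (rows cols : Int) (hideouts : PySem.Set (Int × Int))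
    (st : PySem.Set (Int × Int) × PySem.Set (Int × Int) × Int) :
    PySem.Set (Int × Int) × PySem.Set (Int × Int) × Int :=
  let dragon := pvGetReachable st.1 rows cols
  let vulnerable := PySem.Set.diff (PySem.Set.inter dragon st.2.1) hideouts
  let eaten := st.2.2 + PySem.Set.len vulnerable
  let sheep := PySem.Set.diff st.2.1 vulnerable
  let moved := sheep.foldl (fun (acc : PySem.Set (Int × Int) × Int) p =>
      if p.1 < rows - 1 then
        if !PySem.Set.contains dragon (p.1 + 1, p.2) ||
           PySem.Set.contains hideouts (p.1 + 1, p.2) then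
          (PySem.Set.add acc.1 (p.1 + 1, p.2), acc.2)
        else (acc.1, acc.2 + 1)
      else acc) (PySem.Set.empty, eaten)
  (dragon, moved.1, moved.2)

def pvStepB (rows cols : Nat) (hide : List (List Bool))
    (st : List (List Bool) × List (List Bool) × Int) :
    List (List Bool) × List (List Bool) × Int :=
  let dragon := pvMkGrid rows cols (fun r c =>
    pvOffs.any (fun m =>
      decide (0 ≤ (r : Int) - m.1 ∧ (r : Int) - m.1 < (rows : Int) ∧
              0 ≤ (c : Int) - m.2 ∧ (c : Int) - m.2 < (cols : Int)) &&
      pvAt st.1 ((r : Int) - m.1).toNat ((c : Int) - m.2).toNat))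
  let danger := pvMkGrid rows cols (fun r c => pvAt dragon r c && !pvAt hide r c)
  let surv := pvMkGrid rows cols (fun r c => pvAt st.2.1 r c && !pvAt danger r c)
  let e1 := (List.range rows).foldl (fun acc r => (List.range cols).foldl (fun acc c =>
      if pvAt st.2.1 r c && pvAt danger r c then acc + 1 else acc) acc) st.2.2
  let e2 := (List.range (rows - 1)).foldl (fun acc r => (List.range cols).foldl (fun acc c =>
      if pvAt surv r c && pvAt danger (r + 1) c then acc + 1 else acc) acc) e1
  let sheep := pvMkGrid rows cols (fun r c =>
    decide (0 < r) && pvAt surv (r - 1) c && !pvAt danger r c)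
  (dragon, sheep, e2)

set_option maxHeartbeats 1000000 in
theorem part_two_eq (data : List String) :
    part_two data =
      ((PySem.List.pyRange 0 20 1).foldl
        (fun st _ => pvStepA ((PySem.Str.splitlines (PySem.List.pyGetD data 1 "")).length : Int)
          (PySem.Str.len (PySem.List.pyGetD (PySem.Str.splitlines (PySem.List.pyGetD data 1 "")) 0 ""))
          (pvParseA (PySem.Str.splitlines (PySem.List.pyGetD data 1 ""))).2.2 st)
        ((pvParseA (PySem.Str.splitlines (PySem.List.pyGetD data 1 ""))).1,
         (pvParseA (PySem.Str.splitlines (PySem.List.pyGetD data 1 ""))).2.1, 0)).2.2 := rfl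

set_option maxHeartbeats 1000000 in
theorem part_two_alt_eq (data : List String) :
    part_two_alt data =
      ((PySem.List.pyRange 0 20 1).foldl
        (fun st _ => pvStepB (PySem.Str.splitlines (PySem.List.pyGetD data 1 "")).length
          (PySem.List.pyGetD (PySem.Str.splitlines (PySem.List.pyGetD data 1 "")) 0 "").toList.length
          (pvMkGrid (PySem.Str.splitlines (PySem.List.pyGetD data 1 "")).length
            (PySem.List.pyGetD (PySem.Str.splitlines (PySem.List.pyGetD data 1 "")) 0 "").toList.length
            (fun r c => pvCAt (PySem.Str.splitlines (PySem.List.pyGetD data 1 "")) r c == '#')) st)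
        (pvMkGrid (PySem.Str.splitlines (PySem.List.pyGetD data 1 "")).length
            (PySem.List.pyGetD (PySem.Str.splitlines (PySem.List.pyGetD data 1 "")) 0 "").toList.length
            (fun r c => pvCAt (PySem.Str.splitlines (PySem.List.pyGetD data 1 "")) r c == 'D'),
         pvMkGrid (PySem.Str.splitlines (PySem.List.pyGetD data 1 "")).length
            (PySem.List.pyGetD (PySem.Str.splitlines (PySem.List.pyGetD data 1 "")) 0 "").toList.length
            (fun r c => pvCAt (PySem.Str.splitlines (PySem.List.pyGetD data 1 "")) r c == 'S'), 0)).2.2 := rfl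

-- ----- parse: both initial states describe the same cells -----

theorem pv_mem_foldl2 (lr lc : List Nat) (Q : Nat → Nat → Prop) [∀ r c, Decidable (Q r c)]
    (s : PySem.Set (Int × Int)) (x : Int × Int) :
    x ∈ lr.foldl (fun s r => lc.foldl (fun s c =>
        if Q r c then PySem.Set.add s ((r : Int), (c : Int)) else s) s) s
      ↔ x ∈ s ∨ ∃ r ∈ lr, ∃ c ∈ lc, Q r c ∧ x = ((r : Int), (c : Int)) := by
  induction lr generalizing s with
  | nil => simp
  | cons a lr ih =>
    simp only [List.foldl_cons, ih,
      pv_mem_foldl_add_if lc (Q a) (fun c => ((a : Int), (c : Int))) s x, List.mem_cons]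
    constructor
    · rintro ((h | ⟨c, hc, hQ, hx⟩) | ⟨r, hr, c, hc, hQ, hx⟩)
      · exact Or.inl h
      · exact Or.inr ⟨a, Or.inl rfl, c, hc, hQ, hx⟩
      · exact Or.inr ⟨r, Or.inr hr, c, hc, hQ, hx⟩
    · rintro (h | ⟨r, (rfl | hr), c, hc, hQ, hx⟩)
      · exact Or.inl (Or.inl h)
      · exact Or.inl (Or.inr ⟨c, hc, hQ, hx⟩)
      · exact Or.inr ⟨r, hr, c, hc, hQ, hx⟩

theorem pv_nodup_foldl2 (lr lc : List Nat) (Q : Nat → Nat → Prop) [∀ r c, Decidable (Q r c)]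
    (s : PySem.Set (Int × Int)) (hs : s.Nodup) :
    (lr.foldl (fun s r => lc.foldl (fun s c =>
        if Q r c then PySem.Set.add s ((r : Int), (c : Int)) else s) s) s).Nodup := by
  induction lr generalizing s with
  | nil => exact hs
  | cons a lr ih =>
    exact ih _ (pv_nodup_foldl_add_if lc (Q a) (fun c => ((a : Int), (c : Int))) s hs)

theorem pv_goodS_foldl2 (rows cols : Nat) (Q : Nat → Nat → Prop) [∀ r c, Decidable (Q r c)]
    (QB : Nat → Nat → Bool) (hQ : ∀ r c, r < rows → c < cols → (Q r c ↔ QB r c = true)) :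
    pvGoodS rows cols
      ((List.range rows).foldl (fun s r => (List.range cols).foldl (fun s c =>
          if Q r c then PySem.Set.add s ((r : Int), (c : Int)) else s) s) PySem.Set.empty)
      (pvMkGrid rows cols QB) := by
  refine ⟨pv_nodup_foldl2 _ _ _ _ List.nodup_nil, ?_, ?_⟩
  · intro p hp
    rw [pv_mem_foldl2] at hp
    rcases hp with h | ⟨r, hr, c, hc, _, rfl⟩
    · simp at h
    · simp only [List.mem_range] at hr hc
      simp only [pvInR]
      omega
  · intro r c hr hc
    rw [pv_mem_foldl2, pvAt_mk _ _ _ hr hc]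
    simp only [List.mem_range, PySem.Set.empty, List.not_mem_nil, false_or]
    constructor
    · rintro ⟨r', hr', c', hc', hQ', heq⟩
      have hr2 : r = r' := by
        have := congrArg Prod.fst heq; simp at this; exact_mod_cast this
      have hc2 : c = c' := by
        have := congrArg Prod.snd heq; simp at this; exact_mod_cast this
      subst hr2; subst hc2
      exact (hQ r c hr hc).1 hQ'
    · intro h
      exact ⟨r, hr, c, hc, (hQ r c hr hc).2 h, rfl⟩

theorem pv_foldl_prod2 {β σ1 σ2 : Type} (f : σ1 → β → σ1) (g : σ2 → β → σ2)
    (F : σ1 × σ2 → β → σ1 × σ2)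
    (hF : ∀ st b, F st b = (f st.1 b, g st.2 b)) (l : List β) (st : σ1 × σ2) :
    l.foldl F st = (l.foldl f st.1, l.foldl g st.2) := by
  induction l generalizing st with
  | nil => rfl
  | cons x l ih => rw [List.foldl_cons, hF, ih]; rfl

theorem pv_foldl_prod3 {β σ1 σ2 σ3 : Type} (f : σ1 → β → σ1) (g : σ2 → β → σ2)
    (h : σ3 → β → σ3) (F : σ1 × σ2 × σ3 → β → σ1 × σ2 × σ3)
    (hF : ∀ st b, F st b = (f st.1 b, g st.2.1 b, h st.2.2 b)) (l : List β)
    (st : σ1 × σ2 × σ3) :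
    l.foldl F st = (l.foldl f st.1, l.foldl g st.2.1, l.foldl h st.2.2) := by
  induction l generalizing st with
  | nil => rfl
  | cons x l ih => rw [List.foldl_cons, hF, ih]; rfl

theorem pv_parse_good (board : List String) :
    pvGoodS board.length (board.getD 0 "").toList.length (pvParseA board).1
      (pvMkGrid board.length (board.getD 0 "").toList.length (fun r c => pvCAt board r c == 'D')) ∧
    pvGoodS board.length (board.getD 0 "").toList.length (pvParseA board).2.1
      (pvMkGrid board.length (board.getD 0 "").toList.length (fun r c => pvCAt board r c == 'S')) ∧
    pvGoodS board.length (board.getD 0 "").toList.length (pvParseA board).2.2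
      (pvMkGrid board.length (board.getD 0 "").toList.length (fun r c => pvCAt board r c == '#')) := by
  have hrange : ∀ n : Nat, PySem.List.pyRange 0 (n : Int) 1
      = List.map (fun k : Nat => (k : Int)) (List.range n) := by
    intro n
    rw [PySem.List.pyRange_one]
    simp only [sub_zero, Int.toNat_natCast, zero_add]
  have hsplit : pvParseA board =
      ((List.range board.length).foldl (fun s r =>
          (List.range (board.getD 0 "").toList.length).foldl (fun s c =>
          if pvCAt board r c = 'D' then PySem.Set.add s ((r : Int), (c : Int)) else s) s)
        PySem.Set.empty,
       (List.range board.length).foldl (fun s r =>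
          (List.range (board.getD 0 "").toList.length).foldl (fun s c =>
          if pvCAt board r c = 'S' then PySem.Set.add s ((r : Int), (c : Int)) else s) s)
        PySem.Set.empty,
       (List.range board.length).foldl (fun s r =>
          (List.range (board.getD 0 "").toList.length).foldl (fun s c =>
          if pvCAt board r c = '#' then PySem.Set.add s ((r : Int), (c : Int)) else s) s)
        PySem.Set.empty) := by
    unfold pvParseA
    simp only [PySem.List.pyGetD_zero, PySem.Str.len_eq, hrange, List.foldl_map,
      PySem.List.pyGetD_natCast]
    exact pv_foldl_prod3 _ _ _ _
      (fun st r => pv_foldl_prod3 _ _ _ _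
        (fun st c => by
          by_cases h1 : (board.getD r "").toList.getD c ' ' = 'D' <;>
          by_cases h2 : (board.getD r "").toList.getD c ' ' = 'S' <;>
          by_cases h3 : (board.getD r "").toList.getD c ' ' = '#' <;>
          simp_all [pvCAt]) _ _) _ _
  rw [hsplit]
  refine ⟨pv_goodS_foldl2 _ _ _ _ ?_, pv_goodS_foldl2 _ _ _ _ ?_,
    pv_goodS_foldl2 _ _ _ _ ?_⟩ <;>
    intro r c _ _ <;> simp [pvCAt]

theorem pv_dragon_good (rows cols : Nat) (dA : PySem.Set (Int × Int)) (dB : List (List Bool))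
    (hGD : pvGoodS rows cols dA dB) :
    pvGoodS rows cols (pvGetReachable dA (rows : Int) (cols : Int))
      (pvMkGrid rows cols (fun r c =>
        pvOffs.any (fun m =>
          decide (0 ≤ (r : Int) - m.1 ∧ (r : Int) - m.1 < (rows : Int) ∧
                  0 ≤ (c : Int) - m.2 ∧ (c : Int) - m.2 < (cols : Int)) &&
          pvAt dB ((r : Int) - m.1).toNat ((c : Int) - m.2).toNat))) := by
  obtain ⟨hnd, hrg, hm⟩ := hGD
  have hOM : pvOffs = pvMoves := rfl
  refine ⟨pv_nodup_getReachable _ _ _, ?_, ?_⟩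
  · intro p hp
    rw [pv_mem_getReachable] at hp
    obtain ⟨q, hq, m, hmm, hc, rfl⟩ := hp
    exact ⟨hc.1, hc.2.1, hc.2.2.1, hc.2.2.2⟩
  · intro r c hr hc
    rw [pvAt_mk _ _ _ hr hc, pv_mem_getReachable, List.any_eq_true, hOM]
    constructor
    · rintro ⟨p, hp, m, hmm, hcond, heq⟩
      obtain ⟨p1, p2⟩ := p
      have hprg : 0 ≤ p1 ∧ p1 < (rows : Int) ∧ 0 ≤ p2 ∧ p2 < (cols : Int) := hrg _ hp
      have h1 : p1 = (r : Int) - m.1 := by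
        have := congrArg Prod.fst heq; simp only [Prod.fst] at this; omega
      have h2 : p2 = (c : Int) - m.2 := by
        have := congrArg Prod.snd heq; simp only [Prod.snd] at this; omega
      refine ⟨m, hmm, ?_⟩
      rw [Bool.and_eq_true, decide_eq_true_iff]
      constructor
      · omega
      · have hr' : (((r : Int) - m.1).toNat : Int) = (r : Int) - m.1 := by omega
        have hc' : (((c : Int) - m.2).toNat : Int) = (c : Int) - m.2 := by omega
        rw [← hm ((r : Int) - m.1).toNat ((c : Int) - m.2).toNat (by omega) (by omega)]
        rw [hr', hc', ← h1, ← h2]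
        exact hp
    · rintro ⟨m, hmm, hbool⟩
      rw [Bool.and_eq_true, decide_eq_true_iff] at hbool
      obtain ⟨hcnd, hat⟩ := hbool
      have hr' : (((r : Int) - m.1).toNat : Int) = (r : Int) - m.1 := by omega
      have hc' : (((c : Int) - m.2).toNat : Int) = (c : Int) - m.2 := by omega
      have hmem := (hm ((r : Int) - m.1).toNat ((c : Int) - m.2).toNat (by omega) (by omega)).2 hat
      rw [hr', hc'] at hmem
      exact ⟨_, hmem, m, hmm, by constructor <;> [omega; constructor <;> [omega; constructor <;> omega]],
        by refine Prod.ext ?_ ?_ <;> simp <;> omega⟩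

theorem pv_danger_iff (rows cols : Nat) (d' : PySem.Set (Int × Int)) (dB' : List (List Bool))
    (hGD' : pvGoodS rows cols d' dB') (hA : PySem.Set (Int × Int)) (hB : List (List Bool))
    (hGH : pvGoodS rows cols hA hB) (r c : Nat) (hr : r < rows) (hc : c < cols) :
    pvAt (pvMkGrid rows cols (fun r c => pvAt dB' r c && !pvAt hB r c)) r c = true ↔
      (((r : Int), (c : Int)) ∈ d' ∧ ((r : Int), (c : Int)) ∉ hA) := by
  have h1 := hGD'.2.2 r c hr hc
  have h2 := hGH.2.2 r c hr hc
  rw [pvAt_mk _ _ _ hr hc, Bool.and_eq_true, Bool.not_eq_true', ← h1]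
  constructor
  · rintro ⟨hx, hy⟩
    exact ⟨hx, fun hmem => by rw [h2] at hmem; rw [hmem] at hy; simp at hy⟩
  · rintro ⟨hx, hy⟩
    refine ⟨hx, ?_⟩
    rcases Bool.eq_false_or_eq_true (pvAt hB r c) with h | h
    · exact absurd (h2.2 h) hy
    · exact h

theorem pv_vul_good (rows cols : Nat) (d' : PySem.Set (Int × Int)) (dB' : List (List Bool))
    (hGD' : pvGoodS rows cols d' dB') (sA : PySem.Set (Int × Int)) (sB : List (List Bool))
    (hGS : pvGoodS rows cols sA sB) (hA : PySem.Set (Int × Int)) (hB : List (List Bool))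
    (hGH : pvGoodS rows cols hA hB) :
    PySem.Set.len (PySem.Set.diff (PySem.Set.inter d' sA) hA)
      = (((List.range rows ×ˢ List.range cols).filter (fun p =>
          pvAt sB p.1 p.2 &&
          pvAt (pvMkGrid rows cols (fun r c => pvAt dB' r c && !pvAt hB r c)) p.1 p.2)).length : Int) := by
  unfold PySem.Set.len
  have hnd : (PySem.Set.diff (PySem.Set.inter d' sA) hA).Nodup :=
    PySem.Set.nodup_diff _ _ (PySem.Set.nodup_inter _ _ hGD'.1)
  refine pv_length_eq_grid rows cols _ hnd (fun r c => pvAt sB r c &&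
    pvAt (pvMkGrid rows cols (fun r c => pvAt dB' r c && !pvAt hB r c)) r c) ?_
  intro x
  rw [PySem.Set.mem_diff, PySem.Set.mem_inter]
  constructor
  · rintro ⟨⟨hxd, hxs⟩, hxh⟩
    obtain ⟨x1, x2⟩ := x
    have hrg : 0 ≤ x1 ∧ x1 < (rows : Int) ∧ 0 ≤ x2 ∧ x2 < (cols : Int) := hGS.2.1 _ hxs
    refine ⟨x1.toNat, by omega, x2.toNat, by omega, ?_, by refine Prod.ext ?_ ?_ <;> simp <;> omega⟩
    have hcast : (((x1.toNat : Int)), ((x2.toNat : Int))) = ((x1, x2) : Int × Int) := by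
      refine Prod.ext ?_ ?_ <;> simp <;> omega
    rw [Bool.and_eq_true]
    constructor
    · rw [← hGS.2.2 x1.toNat x2.toNat (by omega) (by omega), hcast]; exact hxs
    · rw [pv_danger_iff rows cols d' dB' hGD' hA hB hGH x1.toNat x2.toNat (by omega) (by omega),
        hcast]
      exact ⟨hxd, hxh⟩
  · rintro ⟨r, hr, c, hc, hC, rfl⟩
    rw [Bool.and_eq_true] at hC
    have hs := (hGS.2.2 r c hr hc).2 hC.1
    have hd := (pv_danger_iff rows cols d' dB' hGD' hA hB hGH r c hr hc).1 hC.2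
    exact ⟨⟨hd.1, hs⟩, hd.2⟩

theorem pv_surv_good (rows cols : Nat) (d' : PySem.Set (Int × Int)) (dB' : List (List Bool))
    (hGD' : pvGoodS rows cols d' dB') (sA : PySem.Set (Int × Int)) (sB : List (List Bool))
    (hGS : pvGoodS rows cols sA sB) (hA : PySem.Set (Int × Int)) (hB : List (List Bool))
    (hGH : pvGoodS rows cols hA hB) :
    pvGoodS rows cols (PySem.Set.diff sA (PySem.Set.diff (PySem.Set.inter d' sA) hA))
      (pvMkGrid rows cols (fun r c => pvAt sB r c &&
        !pvAt (pvMkGrid rows cols (fun r c => pvAt dB' r c && !pvAt hB r c)) r c)) := by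
  refine ⟨PySem.Set.nodup_diff _ _ hGS.1, ?_, ?_⟩
  · intro p hp
    rw [PySem.Set.mem_diff] at hp
    exact hGS.2.1 p hp.1
  · intro r c hr hc
    rw [pvAt_mk _ _ _ hr hc, PySem.Set.mem_diff, PySem.Set.mem_diff, PySem.Set.mem_inter,
      Bool.and_eq_true, Bool.not_eq_true', ← hGS.2.2 r c hr hc]
    have hdan := pv_danger_iff rows cols d' dB' hGD' hA hB hGH r c hr hc
    constructor
    · rintro ⟨hs, hrest⟩
      refine ⟨hs, ?_⟩
      rcases Bool.eq_false_or_eq_true (pvAt (pvMkGrid rows cols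
          (fun r c => pvAt dB' r c && !pvAt hB r c)) r c) with h | h
      · obtain ⟨hd, hh⟩ := hdan.1 h
        exact absurd ⟨⟨hd, hs⟩, hh⟩ hrest
      · exact h
    · rintro ⟨hs, hdf⟩
      refine ⟨hs, ?_⟩
      rintro ⟨⟨hd, -⟩, hh⟩
      have := hdan.2 ⟨hd, hh⟩
      rw [this] at hdf
      simp at hdf

theorem pv_move_split (rowsI : Int) (d' hA : PySem.Set (Int × Int))
    (sh : List (Int × Int)) (e : Int) :
    sh.foldl (fun (acc : PySem.Set (Int × Int) × Int) p =>
      if p.1 < rowsI - 1 then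
        if !PySem.Set.contains d' (p.1 + 1, p.2) || PySem.Set.contains hA (p.1 + 1, p.2) then
          (PySem.Set.add acc.1 (p.1 + 1, p.2), acc.2)
        else (acc.1, acc.2 + 1)
      else acc) (PySem.Set.empty, e)
    = (sh.foldl (fun s p =>
        if (decide (p.1 < rowsI - 1) &&
            (!PySem.Set.contains d' (p.1 + 1, p.2) || PySem.Set.contains hA (p.1 + 1, p.2))) = true
        then PySem.Set.add s (p.1 + 1, p.2) else s) PySem.Set.empty,
       sh.foldl (fun t p =>
        if (fun q : Int × Int => decide (q.1 < rowsI - 1) &&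
            !(!PySem.Set.contains d' (q.1 + 1, q.2) || PySem.Set.contains hA (q.1 + 1, q.2))) p = true
        then t + 1 else t) e) := by
  refine pv_foldl_prod2 _ _ _ ?_ sh (PySem.Set.empty, e)
  intro st p
  have hd' := PySem.Set.contains_iff d' (p.1 + 1, p.2)
  have hh' := PySem.Set.contains_iff hA (p.1 + 1, p.2)
  by_cases h1 : p.1 < rowsI - 1 <;>
    cases hcd : PySem.Set.contains d' (p.1 + 1, p.2) <;>
    cases hch : PySem.Set.contains hA (p.1 + 1, p.2) <;>
    (rw [hcd] at hd'; rw [hch] at hh'; simp at hd' hh'; simp [h1, hcd, hch, hd', hh'])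

theorem pv_eat_count (rows cols : Nat) (d' : PySem.Set (Int × Int)) (dB' : List (List Bool))
    (hGD' : pvGoodS rows cols d' dB') (hA : PySem.Set (Int × Int)) (hB : List (List Bool))
    (hGH : pvGoodS rows cols hA hB) (sh : PySem.Set (Int × Int)) (survB : List (List Bool))
    (hGSsh : pvGoodS rows cols sh survB) (e : Int) :
    sh.foldl (fun t p =>
      if (fun q : Int × Int => decide (q.1 < (rows : Int) - 1) &&
          !(!PySem.Set.contains d' (q.1 + 1, q.2) || PySem.Set.contains hA (q.1 + 1, q.2))) p = true
      then t + 1 else t) e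
    = e + (((List.range (rows - 1) ×ˢ List.range cols).filter (fun p =>
        pvAt survB p.1 p.2 &&
        pvAt (pvMkGrid rows cols (fun r c => pvAt dB' r c && !pvAt hB r c)) (p.1 + 1) p.2)).length : Int) := by
  rw [PySem.List.foldl_count_if]
  congr 1
  rw [List.countP_eq_length_filter]
  have hmem : ∀ x, x ∈ sh.filter (fun q : Int × Int => decide (q.1 < (rows : Int) - 1) &&
      !(!PySem.Set.contains d' (q.1 + 1, q.2) || PySem.Set.contains hA (q.1 + 1, q.2))) ↔
      ∃ r < rows - 1, ∃ c < cols,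
        (pvAt survB r c &&
         pvAt (pvMkGrid rows cols (fun r c => pvAt dB' r c && !pvAt hB r c)) (r + 1) c) = true ∧
        x = ((r : Int), (c : Int)) := by
    intro x
    rw [List.mem_filter]
    constructor
    · rintro ⟨hx, hP⟩
      obtain ⟨x1, x2⟩ := x
      have hrg : 0 ≤ x1 ∧ x1 < (rows : Int) ∧ 0 ≤ x2 ∧ x2 < (cols : Int) := hGSsh.2.1 _ hx
      have hP' : x1 < (rows : Int) - 1 ∧ PySem.Set.contains d' (x1 + 1, x2) = true ∧
          PySem.Set.contains hA (x1 + 1, x2) = false := by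
        revert hP
        cases h1 : PySem.Set.contains d' (x1 + 1, x2) <;>
          cases h2 : PySem.Set.contains hA (x1 + 1, x2) <;> simp
      refine ⟨x1.toNat, by omega, x2.toNat, by omega, ?_,
        by refine Prod.ext ?_ ?_ <;> simp <;> omega⟩
      rw [Bool.and_eq_true]
      have hcast : (((x1.toNat : Nat) : Int), ((x2.toNat : Nat) : Int)) = ((x1, x2) : Int × Int) := by
        refine Prod.ext ?_ ?_ <;> simp <;> omega
      constructor
      · rw [← hGSsh.2.2 x1.toNat x2.toNat (by omega) (by omega), hcast]
        exact hx
      · have h := pv_danger_iff rows cols d' dB' hGD' hA hB hGH (x1.toNat + 1) x2.toNat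
          (by omega) (by omega)
        have hcast2 : (((x1.toNat + 1 : Nat) : Int), ((x2.toNat : Nat) : Int))
            = ((x1 + 1, x2) : Int × Int) := by
          refine Prod.ext ?_ ?_ <;> simp <;> omega
        rw [hcast2] at h
        refine h.2 ⟨(PySem.Set.contains_iff _ _).1 hP'.2.1, fun hm => ?_⟩
        rw [← PySem.Set.contains_iff] at hm
        rw [hP'.2.2] at hm
        simp at hm
    · rintro ⟨r, hr, c, hc, hC, rfl⟩
      rw [Bool.and_eq_true] at hC
      have hmem := (hGSsh.2.2 r c (by omega) hc).2 hC.1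
      refine ⟨hmem, ?_⟩
      have h := (pv_danger_iff rows cols d' dB' hGD' hA hB hGH (r + 1) c (by omega) hc).1 hC.2
      have hcast3 : (((r + 1 : Nat) : Int), ((c : Nat) : Int))
          = (((r : Int) + 1, (c : Int)) : Int × Int) := by
        refine Prod.ext ?_ ?_ <;> simp
      rw [hcast3] at h
      have hcd : PySem.Set.contains d' ((r : Int) + 1, (c : Int)) = true :=
        (PySem.Set.contains_iff _ _).2 h.1
      have hch : PySem.Set.contains hA ((r : Int) + 1, (c : Int)) = false := by
        rcases Bool.eq_false_or_eq_true (PySem.Set.contains hA ((r : Int) + 1, (c : Int))) with hh | hh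
        · exact absurd ((PySem.Set.contains_iff _ _).1 hh) h.2
        · exact hh
      simp only [hcd, hch, Bool.not_true, Bool.false_or, Bool.not_false, Bool.and_true,
        decide_eq_true_iff]
      omega
  exact_mod_cast pv_length_eq_grid (rows - 1) cols _ (List.Nodup.filter _ hGSsh.1) _ hmem

theorem pv_newsheep_good (rows cols : Nat) (d' : PySem.Set (Int × Int)) (dB' : List (List Bool))
    (hGD' : pvGoodS rows cols d' dB') (hA : PySem.Set (Int × Int)) (hB : List (List Bool))
    (hGH : pvGoodS rows cols hA hB) (sh : PySem.Set (Int × Int)) (survB : List (List Bool))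
    (hGSsh : pvGoodS rows cols sh survB) :
    pvGoodS rows cols
      (sh.foldl (fun s p =>
        if (decide (p.1 < (rows : Int) - 1) &&
            (!PySem.Set.contains d' (p.1 + 1, p.2) || PySem.Set.contains hA (p.1 + 1, p.2))) = true
        then PySem.Set.add s (p.1 + 1, p.2) else s) PySem.Set.empty)
      (pvMkGrid rows cols (fun r c =>
        decide (0 < r) && pvAt survB (r - 1) c &&
        !pvAt (pvMkGrid rows cols (fun r c => pvAt dB' r c && !pvAt hB r c)) r c)) := by
  have hmm := pv_mem_foldl_add_if sh
    (fun p : Int × Int => (decide (p.1 < (rows : Int) - 1) &&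
      (!PySem.Set.contains d' (p.1 + 1, p.2) || PySem.Set.contains hA (p.1 + 1, p.2))) = true)
    (fun p => (p.1 + 1, p.2)) PySem.Set.empty
  refine ⟨pv_nodup_foldl_add_if _ _ _ _ List.nodup_nil, ?_, ?_⟩
  · intro p hp
    rw [hmm p] at hp
    rcases hp with h | ⟨q, hq, hP, rfl⟩
    · simp [PySem.Set.empty] at h
    · have hrg : 0 ≤ q.1 ∧ q.1 < (rows : Int) ∧ 0 ≤ q.2 ∧ q.2 < (cols : Int) := hGSsh.2.1 _ hq
      rw [Bool.and_eq_true, decide_eq_true_iff] at hP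
      exact ⟨by omega, by omega, by omega, by omega⟩
  · intro r c hr hc
    rw [hmm, pvAt_mk _ _ _ hr hc]
    simp only [PySem.Set.empty, List.not_mem_nil, false_or]
    have hdan := pv_danger_iff rows cols d' dB' hGD' hA hB hGH r c hr hc
    constructor
    · rintro ⟨q, hq, hP, heq⟩
      obtain ⟨q1, q2⟩ := q
      have hrg : 0 ≤ q1 ∧ q1 < (rows : Int) ∧ 0 ≤ q2 ∧ q2 < (cols : Int) := hGSsh.2.1 _ hq
      rw [Bool.and_eq_true, decide_eq_true_iff] at hP
      have h1 : q1 + 1 = (r : Int) := by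
        have := congrArg Prod.fst heq; simpa using this.symm
      have h2 : q2 = (c : Int) := by
        have := congrArg Prod.snd heq; simpa using this.symm
      have hr1 : 0 < r := by omega
      have hsurv : pvAt survB (r - 1) c = true := by
        rw [← hGSsh.2.2 (r - 1) c (by omega) hc]
        have hcast : (((r - 1 : Nat) : Int), ((c : Nat) : Int)) = ((q1, q2) : Int × Int) := by
          refine Prod.ext ?_ ?_ <;> simp <;> omega
        rw [hcast]
        exact hq
      have hdanF : pvAt (pvMkGrid rows cols (fun r c => pvAt dB' r c && !pvAt hB r c)) r c
          = false := by
        rcases Bool.eq_false_or_eq_true (pvAt (pvMkGrid rows cols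
            (fun r c => pvAt dB' r c && !pvAt hB r c)) r c) with hh | hh
        · obtain ⟨hd, hnh⟩ := hdan.1 hh
          have hsafe := hP.2
          rw [h1, h2] at hsafe
          rcases Bool.or_eq_true_iff.1 hsafe with hs | hs
          · rw [Bool.not_eq_true'] at hs
            rw [← PySem.Set.contains_iff] at hd
            rw [hd] at hs
            simp at hs
          · exact absurd ((PySem.Set.contains_iff _ _).1 hs) hnh
        · exact hh
      simp [hr1, hsurv, hdanF]
    · intro hbool
      rw [Bool.and_eq_true, Bool.and_eq_true, decide_eq_true_iff, Bool.not_eq_true'] at hbool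
      obtain ⟨⟨hr1, hsurv⟩, hdanF⟩ := hbool
      have hq : (((r - 1 : Nat) : Int), ((c : Nat) : Int)) ∈ sh :=
        (hGSsh.2.2 (r - 1) c (by omega) hc).2 hsurv
      refine ⟨_, hq, ?_, ?_⟩
      · rw [Bool.and_eq_true, decide_eq_true_iff]
        have hcast : ((((r - 1 : Nat) : Int) + 1, ((c : Nat) : Int)) : Int × Int)
            = (((r : Int), (c : Int)) : Int × Int) := by
          refine Prod.ext ?_ ?_ <;> simp <;> omega
        constructor
        · simp; omega
        · rw [hcast]
          rcases Bool.eq_false_or_eq_true (PySem.Set.contains d' ((r : Int), (c : Int))) with hh | hh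
          · have hd : ((r : Int), (c : Int)) ∈ d' := (PySem.Set.contains_iff _ _).1 hh
            have : ((r : Int), (c : Int)) ∈ hA := by
              by_contra hnh
              have := hdan.2 ⟨hd, hnh⟩
              rw [this] at hdanF
              simp at hdanF
            rw [(PySem.Set.contains_iff _ _).2 this]
            simp
          · rw [hh]
            simp
      · refine Prod.ext ?_ ?_ <;> simp <;> omega

theorem pv_step_good (rows cols : Nat) (hA : PySem.Set (Int × Int)) (hB : List (List Bool))
    (hGH : pvGoodS rows cols hA hB)
    (a : PySem.Set (Int × Int) × PySem.Set (Int × Int) × Int)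
    (b : List (List Bool) × List (List Bool) × Int)
    (hGD : pvGoodS rows cols a.1 b.1) (hGS : pvGoodS rows cols a.2.1 b.2.1)
    (he : a.2.2 = b.2.2) :
    pvGoodS rows cols (pvStepA (rows : Int) (cols : Int) hA a).1 (pvStepB rows cols hB b).1 ∧
    pvGoodS rows cols (pvStepA (rows : Int) (cols : Int) hA a).2.1 (pvStepB rows cols hB b).2.1 ∧
    (pvStepA (rows : Int) (cols : Int) hA a).2.2 = (pvStepB rows cols hB b).2.2 := by
  obtain ⟨dA, sA, eA⟩ := a
  obtain ⟨dB, sB, eB⟩ := b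
  dsimp only [pvStepA, pvStepB] at hGD hGS he ⊢
  have hGD' := pv_dragon_good rows cols dA dB hGD
  have hsurv := pv_surv_good rows cols _ _ hGD' sA sB hGS hA hB hGH
  rw [pv_move_split]
  refine ⟨hGD', ?_, ?_⟩
  · exact pv_newsheep_good rows cols _ _ hGD' hA hB hGH _ _ hsurv
  · rw [pv_eat_count rows cols _ _ hGD' hA hB hGH _ _ hsurv]
    rw [pv_count_fold rows cols _ eB, pv_count_fold (rows - 1) cols _ _]
    rw [pv_vul_good rows cols _ _ hGD' sA sB hGS hA hB hGH, he]

-- ===== VERDICT (by name: the statement is the Claim_ definition above) =====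
set_option maxHeartbeats 1000000 in
set_option maxRecDepth 8192 in
theorem part_two_spec : Claim_equal_part_two := by
  intro data hdom hpre
  unfold Spec_part_two
  rw [part_two_eq, part_two_alt_eq]
  have hcols : PySem.Str.len (PySem.List.pyGetD
      (PySem.Str.splitlines (PySem.List.pyGetD data 1 "")) 0 "")
      = (((PySem.Str.splitlines (PySem.List.pyGetD data 1 "")).getD 0 "").toList.length : Int) := by
    rw [PySem.List.pyGetD_zero, PySem.Str.len_eq]
  rw [hcols, PySem.List.pyGetD_zero]
  obtain ⟨hgd0, hgs0, hgh0⟩ := pv_parse_good (PySem.Str.splitlines (PySem.List.pyGetD data 1 ""))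
  have hrel := pv_fold_rel
    (R := fun (x : PySem.Set (Int × Int) × PySem.Set (Int × Int) × Int)
        (y : List (List Bool) × List (List Bool) × Int) =>
      pvGoodS (PySem.Str.splitlines (PySem.List.pyGetD data 1 "")).length
        ((PySem.Str.splitlines (PySem.List.pyGetD data 1 "")).getD 0 "").toList.length x.1 y.1 ∧
      pvGoodS (PySem.Str.splitlines (PySem.List.pyGetD data 1 "")).length
        ((PySem.Str.splitlines (PySem.List.pyGetD data 1 "")).getD 0 "").toList.length x.2.1 y.2.1 ∧
      x.2.2 = y.2.2)
    (fA := pvStepA ((PySem.Str.splitlines (PySem.List.pyGetD data 1 "")).length : Int)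
      ((((PySem.Str.splitlines (PySem.List.pyGetD data 1 "")).getD 0 "").toList.length : Nat) : Int)
      (pvParseA (PySem.Str.splitlines (PySem.List.pyGetD data 1 ""))).2.2)
    (fB := pvStepB (PySem.Str.splitlines (PySem.List.pyGetD data 1 "")).length
      ((PySem.Str.splitlines (PySem.List.pyGetD data 1 "")).getD 0 "").toList.length
      (pvMkGrid (PySem.Str.splitlines (PySem.List.pyGetD data 1 "")).length
        ((PySem.Str.splitlines (PySem.List.pyGetD data 1 "")).getD 0 "").toList.length
        (fun r c => pvCAt (PySem.Str.splitlines (PySem.List.pyGetD data 1 "")) r c == '#')))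
    (fun x y hxy => pv_step_good _ _ _ _ hgh0 x y hxy.1 hxy.2.1 hxy.2.2)
    (PySem.List.pyRange 0 20 1)
    ((pvParseA (PySem.Str.splitlines (PySem.List.pyGetD data 1 ""))).1,
     (pvParseA (PySem.Str.splitlines (PySem.List.pyGetD data 1 ""))).2.1, 0)
    (pvMkGrid (PySem.Str.splitlines (PySem.List.pyGetD data 1 "")).length
        ((PySem.Str.splitlines (PySem.List.pyGetD data 1 "")).getD 0 "").toList.length
        (fun r c => pvCAt (PySem.Str.splitlines (PySem.List.pyGetD data 1 "")) r c == 'D'),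
     pvMkGrid (PySem.Str.splitlines (PySem.List.pyGetD data 1 "")).length
        ((PySem.Str.splitlines (PySem.List.pyGetD data 1 "")).getD 0 "").toList.length
        (fun r c => pvCAt (PySem.Str.splitlines (PySem.List.pyGetD data 1 "")) r c == 'S'), 0)
    ⟨hgd0, hgs0, rfl⟩
  exact hrel.2.2
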